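-- pv_equiv track=rewrite | github.com/zhengjunyao-work/arc24 | Junyao/reverse_transformation.py | extract_grid_from_text
-- ===== SOURCE A (Python) =====
-- from typing import Dict, List, Any, Tuple
--
-- def extract_grid_from_text(text: str) -> List[List[int]]:
--     """
--     Extract 2D grid from processed text representation.
--
--     Args:
--         text: Text like "<s><arc_0><arc_1><arc_0><arc_nl><arc_1><arc_1><arc_1><arc_nl><arc_0><arc_1><arc_0><arc_nl></s>"
--
--     Returns:
--         2D list of integers representing the grid
--     """
--     if not text:
--         return []
--
--     # Remove start and end tokens
--     text = text.replace("<s>", "").replace("</s>", "")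
--
--     # Split by newline tokens
--     rows = text.split("<arc_nl>")
--     grid = []
--
--     for row_text in rows:
--         if not row_text.strip():
--             continue
--
--         # Extract cell values from ARC tokens
--         row = []
--         current_token = ""
--         for char in row_text:
--             if char == "<":
--                 current_token = "<"
--             elif char == ">":
--                 current_token += ">"
--                 if current_token.startswith("<arc_") and current_token.endswith(">"):
--                     # Extract the number from <arc_X>
--                     try:
--                         cell_value = int(current_token[5:-1])
--                         row.append(cell_value)
--                     except ValueError:
--                         row.append(0)  # Default for invalid tokens
--                 current_token = ""
--             elif current_token:
--                 current_token += char
--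
--         if row:  # Only add non-empty rows
--             grid.append(row)
--
--     return grid
-- ===== SOURCE B (Python) =====
-- def _tokens(text):
--     """All contents of maximal '<arc_BODY>' matches (BODY free of '<'/'>'), left to right."""
--     toks = []
--     i, n = 0, len(text)
--     while i < n:
--         if text.startswith("<arc_", i):
--             j = i + 5
--             while j < n and text[j] not in "<>":
--                 j += 1
--             if j < n and text[j] == ">":
--                 toks.append(text[i + 5:j])
--                 i = j + 1
--                 continue
--         i += 1
--     return toks
--
--
-- def extract_grid_from_text(text):
--     if not text:
--         return []
--     text = text.replace("<s>", "").replace("</s>", "")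
--     grid, row = [], []
--     for tok in _tokens(text):
--         if tok == "nl":
--             if row:
--                 grid.append(row)
--             row = []
--         else:
--             try:
--                 row.append(int(tok))
--             except ValueError:
--                 row.append(0)
--     if row:
--         grid.append(row)
--     return grid
-- ===== Notes on version B (the rewrite author's own statement) =====
-- stated objective: alternative
-- what changed: B drops A's two-level structure (split the text on the newline token, then run a per-segment character state machine with a token buffer): it scans the whole string once, extracting every arc-token body directly, and then groups that flat token stream into rows with a fold that flushes at newline tokens.
import Mathlib
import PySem

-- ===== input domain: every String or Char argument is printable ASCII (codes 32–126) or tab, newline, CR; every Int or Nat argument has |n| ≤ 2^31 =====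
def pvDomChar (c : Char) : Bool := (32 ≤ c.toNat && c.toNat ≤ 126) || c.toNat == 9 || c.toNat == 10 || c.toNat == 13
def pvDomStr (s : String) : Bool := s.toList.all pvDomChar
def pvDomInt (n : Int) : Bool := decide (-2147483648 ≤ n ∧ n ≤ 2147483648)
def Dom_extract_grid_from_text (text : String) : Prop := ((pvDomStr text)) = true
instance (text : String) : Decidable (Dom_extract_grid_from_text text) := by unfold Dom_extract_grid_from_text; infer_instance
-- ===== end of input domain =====

-- B replaces A's split-then-character-state-machine by one token scan over the whole string
-- plus a grouping fold that flushes rows at newline tokens (alternative decomposition, same cost).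

-- ===== PORT A =====

-- int(tok) with except ValueError -> 0
def pvIntOr0 (cs : List Char) : Int := (PySem.Int.ofChars? cs).getD 0

-- current_token.startswith("<arc_") and current_token.endswith(">")
def pvCond (tok : List Char) : Bool :=
  PySem.Chars.startswith tok "<arc_".toList && PySem.Chars.endswith tok ">".toList

-- int(current_token[5:-1]) with default 0
def pvVal (tok : List Char) : Int := pvIntOr0 (PySem.List.slice tok (some 5) (some (-1)))

-- body of 'for char in row_text', state = (row, current_token)
def pvAStep (st : List Int × List Char) (c : Char) : List Int × List Char :=
  if c = '<' then (st.1, ['<'])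
  else if c = '>' then
    let tok := st.2 ++ ['>']
    (if pvCond tok then st.1 ++ [pvVal tok] else st.1, [])
  else if st.2 ≠ [] then (st.1, st.2 ++ [c]) else st

-- body of 'for row_text in rows'
def pvASeg (g : List (List Int)) (seg : List Char) : List (List Int) :=
  if (PySem.Chars.strip seg).isEmpty then g
  else
    let row := (seg.foldl pvAStep ([], [])).1
    if row ≠ [] then g ++ [row] else g

def extract_grid_from_text (text : String) : List (List Int) :=
  if text.toList.isEmpty then []
  else
    let t := PySem.Chars.replace (PySem.Chars.replace text.toList "<s>".toList "".toList)
               "</s>".toList "".toList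
    let rows := PySem.Chars.splitOn t "<arc_nl>".toList
    rows.foldl pvASeg []

-- ===== PORT B =====

-- text[j] not in "<>"
def pvNotBr (c : Char) : Bool := !(c = '<' || c = '>')

-- _tokens: scan for '<arc_BODY>' matches, restart at i+1 on failure, at j+1 on success
def pvTokens : List Char → List (List Char)
  | [] => []
  | c :: rest =>
    if c = '<' ∧ PySem.Chars.startswith rest "arc_".toList = true then
      -- j runs over (rest.drop 4) while not in "<>"; success iff the stop char is '>'
      let after := (rest.drop 4).dropWhile pvNotBr
      if after.head? = some '>' then (rest.drop 4).takeWhile pvNotBr :: pvTokens after.tail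
      else pvTokens rest
    else pvTokens rest
  termination_by s => s.length
  decreasing_by
    · have h1 : ((rest.drop 4).dropWhile pvNotBr).length ≤ (rest.drop 4).length :=
        List.length_dropWhile_le _ _
      have h2 : (rest.drop 4).length ≤ rest.length := by simp
      simp
      omega
    · simp
    · simp

-- body of 'for tok in _tokens(text)', state = (grid, row)
def pvBStep (st : List (List Int) × List Int) (t : List Char) : List (List Int) × List Int :=
  if t = "nl".toList then (if st.2 ≠ [] then st.1 ++ [st.2] else st.1, [])
  else (st.1, st.2 ++ [pvIntOr0 t])

-- trailing 'if row: grid.append(row)'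
def pvFinish (st : List (List Int) × List Int) : List (List Int) :=
  if st.2 ≠ [] then st.1 ++ [st.2] else st.1

def extract_grid_from_text_alt (text : String) : List (List Int) :=
  if text.toList.isEmpty then []
  else
    let t := PySem.Chars.replace (PySem.Chars.replace text.toList "<s>".toList "".toList)
               "</s>".toList "".toList
    pvFinish ((pvTokens t).foldl pvBStep ([], []))

-- ===== PRECONDITION & SPEC =====
def Spec_extract_grid_from_text (text : String) (out : List (List Int)) : Prop := out = extract_grid_from_text_alt text
instance (text : String) (out : List (List Int)) : Decidable (Spec_extract_grid_from_text text out) := by unfold Spec_extract_grid_from_text; infer_instance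

-- ===== CLAIM (what is proved, stated in full; the proofs are below) =====
def Claim_equal_extract_grid_from_text : Prop := ∀ (text : String), Dom_extract_grid_from_text text → Spec_extract_grid_from_text text (extract_grid_from_text text)

-- ===== LEMMAS AND PROOFS =====

def pvSep : List Char := ['<', 'a', 'r', 'c', '_', 'n', 'l', '>']

-- values emitted by A's char machine from token state `tok` on the remaining chars
def pvRow (tok : List Char) : List Char → List Int
  | [] => []
  | c :: s =>
    if c = '<' then pvRow ['<'] s
    else if c = '>' then
      (if pvCond (tok ++ ['>']) then [pvVal (tok ++ ['>'])] else []) ++ pvRow [] s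
    else if tok ≠ [] then pvRow (tok ++ [c]) s else pvRow tok s

-- clean recursion equal to PySem.Chars.splitOn · pvSep
def pvSpl : List Char → List (List Char)
  | [] => [[]]
  | c :: rest =>
    if pvSep.isPrefixOf (c :: rest) then [] :: pvSpl (rest.drop 7)
    else
      match pvSpl rest with
      | h :: t => (c :: h) :: t
      | [] => [[c]]
  termination_by s => s.length
  decreasing_by all_goals simp

-- A's outer loop, recursively
def pvRunA : List (List Char) → List (List Int)
  | [] => []
  | seg :: segs => (if pvRow [] seg ≠ [] then [pvRow [] seg] else []) ++ pvRunA segs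

-- B's grouping loop, recursively
def pvGroups : List (List Char) → List Int → List (List Int)
  | [], row => if row ≠ [] then [row] else []
  | t :: ts, row =>
    if t = "nl".toList then
      if row ≠ [] then row :: pvGroups ts [] else pvGroups ts []
    else pvGroups ts (row ++ [pvIntOr0 t])

theorem pvNl_eq : "nl".toList = ['n', 'l'] := rfl

theorem pvArc_eq : "arc_".toList = ['a', 'r', 'c', '_'] := rfl

theorem pvSepStr_eq : "<arc_nl>".toList = pvSep := rfl

-- (1) A's machine ignores a char outside a token
theorem pvRow_skip (c : Char) (s : List Char) (hc : c ≠ '<') :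
    pvRow [] (c :: s) = pvRow [] s := by
  by_cases hg : c = '>'
  · subst hg; simp [pvRow, pvCond, PySem.Chars.startswith]
  · simp [pvRow, hc, hg]

-- (2)
theorem pvRow_noLT (u w : List Char) (hu : ∀ c ∈ u, c ≠ '<') :
    pvRow [] (u ++ w) = pvRow [] w := by
  induction u with
  | nil => rfl
  | cons c u ih =>
    rw [List.cons_append, pvRow_skip c _ (hu c (by simp))]
    exact ih (fun d hd => hu d (by simp [hd]))

-- (3) B's scanner ignores chars before the next '<'
theorem pvTok_skip (u w : List Char) (hu : ∀ c ∈ u, c ≠ '<') :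
    pvTokens (u ++ w) = pvTokens w := by
  induction u with
  | nil => rfl
  | cons c u ih =>
    rw [List.cons_append, pvTokens]
    simp [hu c (by simp)]
    exact ih (fun d hd => hu d (by simp [hd]))

-- (4) fold form of A's inner loop vs pvRow
theorem pvFoldA (s : List Char) : ∀ row tok,
    (List.foldl pvAStep (row, tok) s).1 = row ++ pvRow tok s := by
  induction s with
  | nil => intro row tok; simp [pvRow]
  | cons c s ih =>
    intro row tok
    by_cases h1 : c = '<'
    · subst h1; rw [List.foldl_cons]
      simp only [pvAStep, if_pos rfl]
      rw [ih, pvRow]; simp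
    · by_cases h2 : c = '>'
      · subst h2
        rw [List.foldl_cons]
        have hstep : pvAStep (row, tok) '>' =
            ((if pvCond (tok ++ ['>']) then row ++ [pvVal (tok ++ ['>'])] else row), []) := by
          simp [pvAStep]
        rw [hstep, ih, pvRow]
        simp only [if_neg h1, if_pos rfl]
        split <;> simp
      · rw [List.foldl_cons]
        simp only [pvAStep]
        rw [if_neg h1, if_neg h2]
        by_cases h3 : tok = []
        · subst h3; simp only [ne_eq, not_true_eq_false, if_false]
          rw [ih, pvRow]; simp [h1, h2]
        · simp only [ne_eq, h3, not_false_eq_true, if_true]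
          rw [ih, pvRow]; simp [h1, h2, h3]

-- (13) fold form of B's grouping loop vs pvGroups
theorem pvFoldB (ts : List (List Char)) : ∀ g row,
    pvFinish (ts.foldl pvBStep (g, row)) = g ++ pvGroups ts row := by
  induction ts with
  | nil => intro g row; simp [pvFinish, pvGroups]; split <;> simp
  | cons t ts ih =>
    intro g row
    rw [List.foldl_cons]
    simp only [pvBStep, pvGroups]
    by_cases h : t = "nl".toList
    · rw [if_pos h, if_pos h]
      by_cases hr : row = []
      · subst hr; simp [ih]
      · simp only [ne_eq, hr, not_false_eq_true, if_true, ih]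
        simp
    · rw [if_neg h, if_neg h, ih]

-- (14) grouping with no 'nl' token yields one row (if any values)
theorem pvG2 (ts : List (List Char)) : ∀ row, "nl".toList ∉ ts →
    pvGroups ts row =
      if row ++ ts.map pvIntOr0 ≠ [] then [row ++ ts.map pvIntOr0] else [] := by
  induction ts with
  | nil => intro row _; simp [pvGroups]
  | cons t ts ih =>
    intro row h
    have ht : t ≠ "nl".toList := by intro e; subst e; exact h (by simp)
    rw [pvGroups, if_neg ht]
    rw [ih _ (fun e => h (List.mem_cons_of_mem _ e))]
    simp

-- (15) grouping across the first 'nl'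
theorem pvG3 (ts1 : List (List Char)) : ∀ ts2 row, "nl".toList ∉ ts1 →
    pvGroups (ts1 ++ "nl".toList :: ts2) row =
      (if row ++ ts1.map pvIntOr0 ≠ [] then [row ++ ts1.map pvIntOr0] else []) ++
        pvGroups ts2 [] := by
  induction ts1 with
  | nil =>
    intro ts2 row _
    rw [List.nil_append, pvGroups, if_pos rfl]
    by_cases hr : row = [] <;> simp [hr]
  | cons t ts1 ih =>
    intro ts2 row h
    have ht : t ≠ "nl".toList := by intro e; subst e; exact h (by simp)
    rw [List.cons_append, pvGroups, if_neg ht]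
    rw [ih _ _ (fun e => h (List.mem_cons_of_mem _ e))]
    simp

-- (16)
theorem pvSpl_ne (l : List Char) : pvSpl l ≠ [] := by
  rw [pvSpl.eq_def]
  split
  · simp
  · split
    · simp
    · split <;> simp

-- (22) one outer-loop step of A
theorem pvSeg_eq (g : List (List Int)) (seg : List Char) :
    pvASeg g seg = g ++ (if pvRow [] seg ≠ [] then [pvRow [] seg] else []) := by
  rw [pvASeg]
  by_cases h : (PySem.Chars.strip seg).isEmpty
  · rw [if_pos h]
    have hs : ∀ c ∈ seg, c ≠ '<' := by
      intro c hc he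
      -- strip empty means every char is whitespace; '<' is not whitespace
      have hsp : ∀ d ∈ seg, PySem.Chars.isspace d := by
        intro d hd
        have h0 : PySem.Chars.strip seg = [] := by
          cases hstrip : PySem.Chars.strip seg with
          | nil => rfl
          | cons x xs => rw [hstrip] at h; simp at h
        rw [PySem.Chars.strip, PySem.Chars.rstrip, PySem.Chars.lstrip] at h0
        have h1 : List.dropWhile PySem.Chars.isspace
            (List.dropWhile PySem.Chars.isspace seg).reverse = [] := by
          simpa using h0
        rw [List.dropWhile_eq_nil_iff] at h1
        rcases List.append_of_mem hd with ⟨u, v, rfl⟩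
        by_cases hmem : d ∈ List.dropWhile PySem.Chars.isspace (u ++ d :: v)
        · exact h1 d (by simpa using hmem)
        · -- d was dropped by the left dropWhile, so it is whitespace
          have := List.takeWhile_append_dropWhile (p := PySem.Chars.isspace) (l := u ++ d :: v)
          have hdm : d ∈ List.takeWhile PySem.Chars.isspace (u ++ d :: v) := by
            have : d ∈ List.takeWhile PySem.Chars.isspace (u ++ d :: v) ++
                List.dropWhile PySem.Chars.isspace (u ++ d :: v) := by
              rw [this]; simp
            rcases List.mem_append.mp this with h' | h'
            · exact h'
            · exact absurd h' hmem
          exact List.mem_takeWhile_imp hdm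
      have := hsp c hc
      rw [he] at this
      exact absurd this (by decide)
    have : pvRow [] seg = [] := by
      have := pvRow_noLT seg [] hs
      simpa using this
    simp [this]
  · rw [if_neg h, pvFoldA]
    simp only [List.nil_append]
    split <;> simp

-- (23) fold form of A's outer loop
theorem pvFoldRunA (segs : List (List Char)) : ∀ g,
    segs.foldl pvASeg g = g ++ pvRunA segs := by
  induction segs with
  | nil => intro g; simp [pvRunA]
  | cons seg segs ih =>
    intro g
    rw [List.foldl_cons, pvSeg_eq, ih, pvRunA]
    simp

-- (6)
theorem pvCond_arc (w : List Char) :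
    pvCond ('<' :: 'a' :: 'r' :: 'c' :: '_' :: (w ++ ['>'])) = true := by
  rw [pvCond]
  apply Bool.and_eq_true_iff.mpr
  constructor
  · simp [PySem.Chars.startswith, pvArc_eq, List.isPrefixOf]
  · rw [PySem.Chars.endswith_iff]
    show ['>'] <:+ _
    have h1 : ['>'] <:+ w ++ ['>'] := List.suffix_append w ['>']
    exact h1.trans (List.suffix_append ['<', 'a', 'r', 'c', '_'] (w ++ ['>']))

-- (7)
theorem pvVal_arc (w : List Char) :
    pvVal ('<' :: 'a' :: 'r' :: 'c' :: '_' :: (w ++ ['>'])) = pvIntOr0 w := by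
  rw [pvVal]
  congr 1
  simp [PySem.List.slice]

-- (8)
theorem pv_prefix_snoc {q w : List Char} {c : Char} (h : q <+: w ++ [c]) (hc : c ∉ q) :
    q <+: w := by
  rcases h with ⟨t, ht⟩
  rcases List.eq_nil_or_concat t with rfl | ⟨t', c', rfl⟩
  · rw [List.append_nil] at ht
    exact absurd (by rw [ht]; simp : c ∈ q) hc
  · have ht' : (q ++ t') ++ [c'] = w ++ [c] := by
      simpa [List.concat_eq_append, List.append_assoc] using ht
    have h2 := List.append_inj' ht' rfl
    exact ⟨t', h2.1⟩

-- (5) A's machine inside a token: scan to the next bracket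
theorem pvRow_steps (s : List Char) : ∀ mid, pvRow ('<' :: mid) s =
    (match s.dropWhile pvNotBr with
     | '>' :: rest =>
       (if pvCond ('<' :: (mid ++ s.takeWhile pvNotBr) ++ ['>'])
        then [pvVal ('<' :: (mid ++ s.takeWhile pvNotBr) ++ ['>'])] else []) ++ pvRow [] rest
     | x => pvRow [] x) := by
  induction s with
  | nil => intro mid; simp [pvRow, List.dropWhile]
  | cons c s ih =>
    intro mid
    by_cases h1 : c = '<'
    · subst h1
      rw [pvRow]
      have hd : List.dropWhile pvNotBr ('<' :: s) = '<' :: s := by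
        simp [List.dropWhile, pvNotBr]
      rw [hd]
      show pvRow ['<'] s = pvRow [] ('<' :: s)
      conv_rhs => rw [pvRow]
      simp
    · by_cases h2 : c = '>'
      · subst h2
        rw [pvRow]
        simp only [if_neg h1, if_pos rfl]
        have hd : List.dropWhile pvNotBr ('>' :: s) = '>' :: s := by
          simp [List.dropWhile, pvNotBr]
        have htk : List.takeWhile pvNotBr ('>' :: s) = [] := by
          simp [List.takeWhile, pvNotBr]
        rw [hd, htk]
        simp
      · have hp : pvNotBr c = true := by simp [pvNotBr, h1, h2]
        rw [pvRow]
        simp only [if_neg h1, if_neg h2]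
        have hne : ('<' :: mid : List Char) ≠ [] := by simp
        simp only [if_pos hne]
        rw [show ('<' :: mid) ++ [c] = '<' :: (mid ++ [c]) by simp, ih]
        have hd : List.dropWhile pvNotBr (c :: s) = List.dropWhile pvNotBr s := by
          simp [List.dropWhile, hp]
        have htk : List.takeWhile pvNotBr (c :: s) = c :: List.takeWhile pvNotBr s := by
          simp [List.takeWhile, hp]
        rw [hd, htk]
        have : mid ++ [c] ++ List.takeWhile pvNotBr s = mid ++ (c :: List.takeWhile pvNotBr s) := by
          simp
        rw [this]

theorem pvRow_lt (tok s) : pvRow tok ('<' :: s) = pvRow ['<'] s := by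
  rw [pvRow]; simp

theorem pvNotBr_ne {c : Char} (h : pvNotBr c = true) : c ≠ '<' ∧ c ≠ '>' := by
  simp [pvNotBr] at h; exact h

theorem pvTok_nil : pvTokens [] = [] := by rw [pvTokens]

theorem pvTok_cons_notlt {c : Char} (s : List Char) (h : c ≠ '<') :
    pvTokens (c :: s) = pvTokens s := by
  rw [pvTokens, if_neg (fun hc => h hc.1)]

theorem pvTok_cons_noarc (s : List Char) (h : ¬ PySem.Chars.startswith s "arc_".toList = true) :
    pvTokens ('<' :: s) = pvTokens s := by
  rw [pvTokens, if_neg (fun hc => h hc.2)]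

theorem pvStarts_arc (v : List Char) :
    PySem.Chars.startswith ('a' :: 'r' :: 'c' :: '_' :: v) "arc_".toList = true := by
  simp [PySem.Chars.startswith, pvArc_eq, List.isPrefixOf]

theorem pvTok_arc_gt (v rest : List Char) (h3 : v.dropWhile pvNotBr = '>' :: rest) :
    pvTokens ('<' :: 'a' :: 'r' :: 'c' :: '_' :: v) = v.takeWhile pvNotBr :: pvTokens rest := by
  rw [pvTokens, if_pos ⟨rfl, pvStarts_arc v⟩]
  have hdrop : (('a' :: 'r' :: 'c' :: '_' :: v).drop 4) = v := by simp
  simp only [hdrop, h3]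
  rfl

theorem pvTok_arc_fail (v : List Char) (h3 : ∀ rest, v.dropWhile pvNotBr ≠ '>' :: rest) :
    pvTokens ('<' :: 'a' :: 'r' :: 'c' :: '_' :: v) = pvTokens ('a' :: 'r' :: 'c' :: '_' :: v) := by
  rw [pvTokens, if_pos ⟨rfl, pvStarts_arc v⟩]
  have hdrop : (('a' :: 'r' :: 'c' :: '_' :: v).drop 4) = v := by simp
  have hh : (v.dropWhile pvNotBr).head? ≠ some '>' := by
    cases hx : v.dropWhile pvNotBr with
    | nil => simp
    | cons d r =>
      simp only [List.head?_cons]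
      intro hd
      have hd' : d = '>' := by injection hd
      exact h3 r (by rw [hx, hd'])
  simp only [hdrop]
  rw [if_neg hh]

theorem pvTakeWhile_no_lt (v : List Char) : ∀ c ∈ v.takeWhile pvNotBr, c ≠ '<' :=
  fun c hc => (pvNotBr_ne (List.mem_takeWhile_imp hc)).1

-- (10) on one string, A's machine emits exactly B's token values
theorem pvB2 : ∀ n s, s.length ≤ n → pvRow [] s = (pvTokens s).map pvIntOr0 := by
  intro n
  induction n with
  | zero =>
    intro s hs
    have : s = [] := List.eq_nil_of_length_eq_zero (by omega)
    subst this; simp [pvRow, pvTok_nil]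
  | succ n ih =>
    intro s hs
    match s with
    | [] => simp [pvRow, pvTok_nil]
    | c :: s' =>
      by_cases h1 : c = '<'
      · subst h1
        rw [pvRow_lt]
        rw [pvRow_steps]
        by_cases h2 : PySem.Chars.startswith s' "arc_".toList = true
        · -- s' = arc_ ++ v
          have hpre : "arc_".toList <+: s' := (PySem.Chars.startswith_iff _ _).mp h2
          obtain ⟨v, hv⟩ := hpre
          rw [pvArc_eq] at hv
          have hv2 : s' = 'a' :: 'r' :: 'c' :: '_' :: v := by rw [← hv]; rfl
          subst hv2
          have hd : List.dropWhile pvNotBr ('a' :: 'r' :: 'c' :: '_' :: v) =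
              List.dropWhile pvNotBr v := by
            simp [List.dropWhile_cons, pvNotBr]
          have htk : List.takeWhile pvNotBr ('a' :: 'r' :: 'c' :: '_' :: v) =
              'a' :: 'r' :: 'c' :: '_' :: List.takeWhile pvNotBr v := by
            simp [List.takeWhile_cons, pvNotBr]
          rw [hd, htk]
          have hlenv : v.length + 5 ≤ n + 1 := by simpa using hs
          cases h3 : List.dropWhile pvNotBr v with
          | nil =>
            -- no closing bracket: machine emits nothing, scanner finds nothing
            have hfail := pvTok_arc_fail v (by intro rest; rw [h3]; simp)
            have hall : ∀ c ∈ ('a' :: 'r' :: 'c' :: '_' :: v), c ≠ '<' := by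
              intro c hc
              have hv' : v = v.takeWhile pvNotBr := by
                conv_lhs => rw [← List.takeWhile_append_dropWhile (p := pvNotBr) (l := v)]
                rw [h3, List.append_nil]
              simp at hc
              rcases hc with rfl | rfl | rfl | rfl | hc
              · simp
              · simp
              · simp
              · simp
              · exact pvTakeWhile_no_lt v c (hv' ▸ hc)
            have : pvTokens ('a' :: 'r' :: 'c' :: '_' :: v) = [] := by
              have hsk := pvTok_skip ('a' :: 'r' :: 'c' :: '_' :: v) [] hall
              rw [List.append_nil] at hsk
              rw [hsk, pvTok_nil]
            rw [hfail, this]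
            rfl
          | cons d rest =>
            by_cases hdq : d = '>'
            · subst hdq
              -- a full token
              rw [pvTok_arc_gt v rest h3]
              have hcond := pvCond_arc (List.takeWhile pvNotBr v)
              have hval := pvVal_arc (List.takeWhile pvNotBr v)
              simp only [List.nil_append]
              rw [show ('<' :: ('a' :: 'r' :: 'c' :: '_' :: List.takeWhile pvNotBr v) ++ ['>'] : List Char) =
                '<' :: 'a' :: 'r' :: 'c' :: '_' :: (List.takeWhile pvNotBr v ++ ['>']) by simp]
              rw [if_pos hcond, hval]
              have hlr : rest.length ≤ n := by
                have h5 : ('>' :: rest).length ≤ v.length := by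
                  rw [← h3]; exact List.length_dropWhile_le _ _
                simp at h5; omega
              rw [ih rest hlr]
              rfl
            · -- hit another '<': machine resets, scanner rescans from there
              have hdlt : d = '<' := by
                have hnb := List.head_dropWhile_not (p := pvNotBr) (l := v)
                rw [h3] at hnb
                simp [pvNotBr] at hnb
                by_cases hdl : d = '<'
                · exact hdl
                · exact absurd (hnb hdl) hdq
              subst hdlt
              have hfail := pvTok_arc_fail v (by intro r hr; rw [h3] at hr; cases hr)
              have hsplit : v = List.takeWhile pvNotBr v ++ '<' :: rest := by
                conv_lhs => rw [← List.takeWhile_append_dropWhile (p := pvNotBr) (l := v)]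
                rw [h3]
              have hskip : pvTokens ('a' :: 'r' :: 'c' :: '_' :: v) = pvTokens ('<' :: rest) := by
                conv_lhs => rw [hsplit]
                exact pvTok_skip ('a' :: 'r' :: 'c' :: '_' :: List.takeWhile pvNotBr v)
                  ('<' :: rest) (by
                    intro c hc
                    simp at hc
                    rcases hc with rfl | rfl | rfl | rfl | hc
                    · simp
                    · simp
                    · simp
                    · simp
                    · exact pvTakeWhile_no_lt v c hc)
              rw [hfail, hskip]
              apply ih
              have h5 : ('<' :: rest).length ≤ v.length := by
                rw [← h3]; exact List.length_dropWhile_le _ _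
              omega
        · -- not an arc_ token at this '<'
          rw [pvTok_cons_noarc s' h2]
          have hlen' : s'.length ≤ n := by simp at hs; omega
          cases h3 : List.dropWhile pvNotBr s' with
          | nil =>
            have hall : ∀ c ∈ s', c ≠ '<' := by
              intro c hc
              have hv' : s' = s'.takeWhile pvNotBr := by
                conv_lhs => rw [← List.takeWhile_append_dropWhile (p := pvNotBr) (l := s')]
                rw [h3, List.append_nil]
              exact pvTakeWhile_no_lt s' c (hv' ▸ hc)
            have : pvTokens s' = [] := by
              have hsk := pvTok_skip s' [] hall
              rw [List.append_nil] at hsk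
              rw [hsk, pvTok_nil]
            rw [this]
            rfl
          | cons d rest =>
            have hsplit : s' = List.takeWhile pvNotBr s' ++ d :: rest := by
              conv_lhs => rw [← List.takeWhile_append_dropWhile (p := pvNotBr) (l := s')]
              rw [h3]
            have hskip : pvTokens s' = pvTokens (d :: rest) := by
              conv_lhs => rw [hsplit]
              exact pvTok_skip _ _ (pvTakeWhile_no_lt s')
            have hlr : rest.length ≤ n := by
              have h5 : (d :: rest).length ≤ s'.length := by
                rw [← h3]; exact List.length_dropWhile_le _ _
              simp at h5; omega
            by_cases hdq : d = '>'
            · subst hdq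
              -- token would close but does not start with '<arc_'
              have hcond : pvCond ('<' :: ([] ++ List.takeWhile pvNotBr s') ++ ['>']) = false := by
                apply Bool.eq_false_iff.mpr
                intro hcnd
                rw [pvCond] at hcnd
                have hsw := (Bool.and_eq_true_iff.mp hcnd).1
                have hp : "<arc_".toList <+: '<' :: ([] ++ List.takeWhile pvNotBr s') ++ ['>'] :=
                  (PySem.Chars.startswith_iff _ _).mp hsw
                have hp2 : "arc_".toList <+: List.takeWhile pvNotBr s' ++ ['>'] := by
                  rw [pvArc_eq]
                  have : "<arc_".toList = '<' :: "arc_".toList := rfl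
                  rw [this, pvArc_eq] at hp
                  simpa using hp
                have hp3 : "arc_".toList <+: List.takeWhile pvNotBr s' :=
                  pv_prefix_snoc hp2 (by rw [pvArc_eq]; decide)
                have : "arc_".toList <+: s' := hp3.trans (List.takeWhile_prefix _)
                exact h2 ((PySem.Chars.startswith_iff _ _).mpr this)
              rw [hcond]
              simp only [if_neg (by simp : ¬ (false = true)), List.nil_append]
              rw [hskip, pvTok_cons_notlt rest (by decide)]
              exact ih rest hlr
            · have hdlt : d = '<' := by
                have hnb := List.head_dropWhile_not (p := pvNotBr) (l := s')
                rw [h3] at hnb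
                simp [pvNotBr] at hnb
                by_cases hdl : d = '<'
                · exact hdl
                · exact absurd (hnb hdl) hdq
              subst hdlt
              rw [hskip]
              apply ih
              have h5 : ('<' :: rest).length ≤ s'.length := by
                rw [← h3]; exact List.length_dropWhile_le _ _
              simp at h5 ⊢
              omega
      · rw [pvRow_skip c s' h1, pvTok_cons_notlt s' h1]
        exact ih s' (by simp at hs; omega)

theorem pv_pref_split {q u w : List Char} (h : q <+: u ++ w) :
    q <+: u ∨ ∃ r, q = u ++ r ∧ r <+: w := by
  rcases h with ⟨t, ht⟩
  by_cases hl : q.length ≤ u.length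
  · left
    exact List.prefix_of_prefix_length_le ⟨t, ht⟩ (List.prefix_append u w) hl
  · right
    have hu : u <+: q :=
      List.prefix_of_prefix_length_le (List.prefix_append u w) ⟨t, ht⟩ (by omega)
    obtain ⟨r, hr⟩ := hu
    refine ⟨r, hr.symm, ?_⟩
    rw [← hr, List.append_assoc] at ht
    exact ⟨t, (List.append_cancel_left ht)⟩

-- 'arc_' prefix of a string cannot start using chars of an appended tail headed by '<'
theorem pvArc_prefix_append {s0 y : List Char} (h : "arc_".toList <+: s0 ++ ('<' :: y)) :
    "arc_".toList <+: s0 := by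
  rcases pv_pref_split h with h | ⟨r, hq, hr⟩
  · exact h
  · rcases r with _ | ⟨d, r'⟩
    · rw [List.append_nil] at hq
      exact hq ▸ List.prefix_refl _
    · have hd : d = '<' := ((List.cons_prefix_cons).mp hr).1
      subst hd
      have : '<' ∈ "arc_".toList := by rw [hq]; simp
      rw [pvArc_eq] at this
      simp at this

theorem pv_tw_append (v x : List Char) (h : v.dropWhile pvNotBr ≠ []) :
    (v ++ x).takeWhile pvNotBr = v.takeWhile pvNotBr ∧
    (v ++ x).dropWhile pvNotBr = v.dropWhile pvNotBr ++ x := by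
  induction v with
  | nil => simp at h
  | cons c v ih =>
    by_cases hp : pvNotBr c = true
    · have h' : v.dropWhile pvNotBr ≠ [] := by
        rw [List.dropWhile_cons, if_pos hp] at h; exact h
      obtain ⟨h1, h2⟩ := ih h'
      constructor
      · rw [List.cons_append, List.takeWhile_cons, if_pos hp, h1,
          List.takeWhile_cons, if_pos hp]
      · rw [List.cons_append, List.dropWhile_cons, if_pos hp, h2,
          List.dropWhile_cons, if_pos hp]
    · constructor
      · rw [List.cons_append, List.takeWhile_cons, if_neg hp, List.takeWhile_cons, if_neg hp]
      · rw [List.cons_append, List.dropWhile_cons, if_neg hp, List.dropWhile_cons, if_neg hp,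
          List.cons_append]

theorem pvTok_sep (rest : List Char) :
    pvTokens (pvSep ++ rest) = "nl".toList :: pvTokens rest := by
  have h : pvSep ++ rest = '<' :: 'a' :: 'r' :: 'c' :: '_' :: ('n' :: 'l' :: '>' :: rest) := rfl
  rw [h, pvTok_arc_gt ('n' :: 'l' :: '>' :: rest) rest (by
    simp [List.dropWhile_cons, pvNotBr])]
  rw [pvNl_eq]
  simp [List.takeWhile_cons, pvNotBr]

-- (11) the scanner factors through the first newline separator
theorem pvB1 : ∀ n s0, s0.length ≤ n → ∀ rest,
    pvTokens (s0 ++ (pvSep ++ rest)) = pvTokens s0 ++ "nl".toList :: pvTokens rest := by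
  intro n
  induction n with
  | zero =>
    intro s0 h rest
    have : s0 = [] := List.eq_nil_of_length_eq_zero (by omega)
    subst this
    rw [List.nil_append, pvTok_sep, pvTok_nil, List.nil_append]
  | succ n ih =>
    intro s0 hlen rest
    match s0 with
    | [] => rw [List.nil_append, pvTok_sep, pvTok_nil, List.nil_append]
    | c :: s0' =>
      have hlen' : s0'.length ≤ n := by simp at hlen; omega
      by_cases h1 : c = '<'
      · subst h1
        by_cases h2 : "arc_".toList <+: s0'
        · obtain ⟨v, hv⟩ := h2
          rw [pvArc_eq] at hv
          have hv2 : s0' = 'a' :: 'r' :: 'c' :: '_' :: v := by rw [← hv]; rfl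
          subst hv2
          have hshape : ('<' :: ('a' :: 'r' :: 'c' :: '_' :: v ++ (pvSep ++ rest)) : List Char) =
              '<' :: 'a' :: 'r' :: 'c' :: '_' :: (v ++ (pvSep ++ rest)) := by simp
          rw [List.cons_append, hshape]
          cases hdw : v.dropWhile pvNotBr with
          | nil =>
            -- body runs to the end of the segment; stops at the separator's '<'
            have hall : ∀ x ∈ v, pvNotBr x = true := by
              rw [← List.dropWhile_eq_nil_iff]; exact hdw
            have htv : v.takeWhile pvNotBr = v := List.takeWhile_eq_self_iff.mpr hall
            have hdwv : (v ++ (pvSep ++ rest)).dropWhile pvNotBr = pvSep ++ rest := by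
              rw [List.dropWhile_append]
              simp [hdw, List.dropWhile_cons, pvSep, pvNotBr]
            have hfail := pvTok_arc_fail (v ++ (pvSep ++ rest)) (by
              intro r hr
              rw [hdwv] at hr
              cases hr)
            rw [hfail]
            have hskip : pvTokens ('a' :: 'r' :: 'c' :: '_' :: (v ++ (pvSep ++ rest))) =
                pvTokens (pvSep ++ rest) := by
              have := pvTok_skip ('a' :: 'r' :: 'c' :: '_' :: v) (pvSep ++ rest) (by
                intro x hx
                simp at hx
                rcases hx with rfl | rfl | rfl | rfl | hx
                · simp
                · simp
                · simp
                · simp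
                · exact (pvNotBr_ne (hall x hx)).1)
              simpa using this
            rw [hskip, pvTok_sep]
            have hrhs := pvTok_arc_fail v (by intro r hr; rw [hdw] at hr; cases hr)
            rw [hrhs]
            have hrhs2 : pvTokens ('a' :: 'r' :: 'c' :: '_' :: v) = [] := by
              have := pvTok_skip ('a' :: 'r' :: 'c' :: '_' :: v) [] (by
                intro x hx
                simp at hx
                rcases hx with rfl | rfl | rfl | rfl | hx
                · simp
                · simp
                · simp
                · simp
                · exact (pvNotBr_ne (hall x hx)).1)
              rw [List.append_nil] at this
              rw [this, pvTok_nil]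
            rw [hrhs2]
            rfl
          | cons d r =>
            have hvne : v.dropWhile pvNotBr ≠ [] := by rw [hdw]; simp
            obtain ⟨htw, hdw2⟩ := pv_tw_append v (pvSep ++ rest) hvne
            rw [hdw] at hdw2
            by_cases hdq : d = '>'
            · subst hdq
              have hlr : r.length ≤ n := by
                have h5 : ('>' :: r).length ≤ v.length := by
                  rw [← hdw]; exact List.length_dropWhile_le _ _
                simp at h5 hlen'; omega
              rw [pvTok_arc_gt (v ++ (pvSep ++ rest)) (r ++ (pvSep ++ rest)) (by
                rw [hdw2]; rfl)]
              rw [htw, ih r hlr rest]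
              rw [pvTok_arc_gt v r hdw]
              simp
            · have hdlt : d = '<' := by
                have hnb := List.head_dropWhile_not (p := pvNotBr) (l := v)
                rw [hdw] at hnb
                simp [pvNotBr] at hnb
                by_cases hdl : d = '<'
                · exact hdl
                · exact absurd (hnb hdl) hdq
              subst hdlt
              rw [pvTok_arc_fail (v ++ (pvSep ++ rest)) (by
                intro rr hrr
                rw [hdw2] at hrr
                have : '<' = '>' := by injection hrr
                exact absurd this (by decide))]
              rw [pvTok_arc_fail v (by
                intro rr hrr
                rw [hdw] at hrr
                have : '<' = '>' := by injection hrr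
                exact absurd this (by decide))]
              have hshape2 : ('a' :: 'r' :: 'c' :: '_' :: (v ++ (pvSep ++ rest)) : List Char) =
                  ('a' :: 'r' :: 'c' :: '_' :: v) ++ (pvSep ++ rest) := by simp
              rw [hshape2]
              exact ih ('a' :: 'r' :: 'c' :: '_' :: v) hlen' rest
        · -- '<' not followed by 'arc_' on either reading
          have hsep : (pvSep ++ rest : List Char) =
              '<' :: (['a', 'r', 'c', '_', 'n', 'l', '>'] ++ rest) := rfl
          have hg1 : ¬ "arc_".toList <+: s0' ++ (pvSep ++ rest) := by
            intro hg
            rw [hsep] at hg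
            exact h2 (pvArc_prefix_append hg)
          rw [List.cons_append]
          rw [pvTok_cons_noarc (s0' ++ (pvSep ++ rest))
            (fun hs => hg1 ((PySem.Chars.startswith_iff _ _).mp hs))]
          rw [pvTok_cons_noarc s0' (fun hs => h2 ((PySem.Chars.startswith_iff _ _).mp hs))]
          exact ih s0' hlen' rest
      · -- c is not '<'
        rw [List.cons_append]
        rw [pvTok_cons_notlt (s0' ++ (pvSep ++ rest)) h1]
        rw [pvTok_cons_notlt s0' h1]
        exact ih s0' hlen' rest

-- (12) an 'nl' token comes only from a literal '<arc_nl>' occurrence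
theorem pvTok_infix : ∀ n s, s.length ≤ n → "nl".toList ∈ pvTokens s → pvSep <:+: s := by
  intro n
  induction n with
  | zero =>
    intro s hs hm
    have : s = [] := List.eq_nil_of_length_eq_zero (by omega)
    subst this
    rw [pvTok_nil] at hm
    simp at hm
  | succ n ih =>
    intro s hs hm
    match s with
    | [] => rw [pvTok_nil] at hm; simp at hm
    | c :: s' =>
      have hlen' : s'.length ≤ n := by simp at hs; omega
      have hsuf : s' <:+ c :: s' := List.suffix_cons c s'
      by_cases h1 : c = '<'
      · subst h1
        by_cases h2 : "arc_".toList <+: s'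
        · obtain ⟨v, hv⟩ := h2
          rw [pvArc_eq] at hv
          have hv2 : s' = 'a' :: 'r' :: 'c' :: '_' :: v := by rw [← hv]; rfl
          subst hv2
          cases hdw : v.dropWhile pvNotBr with
          | nil =>
            rw [pvTok_arc_fail v (by intro r hr; rw [hdw] at hr; cases hr)] at hm
            exact (ih _ hlen' hm).trans hsuf.isInfix
          | cons d r =>
            by_cases hdq : d = '>'
            · subst hdq
              rw [pvTok_arc_gt v r hdw] at hm
              rcases List.mem_cons.mp hm with he | hm'
              · -- the found token itself is 'nl'
                have hv3 : v = 'n' :: 'l' :: '>' :: r := by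
                  conv_lhs => rw [← List.takeWhile_append_dropWhile (p := pvNotBr) (l := v)]
                  rw [hdw, ← he, pvNl_eq]
                  rfl
                refine ⟨[], r, ?_⟩
                rw [hv3]
                rfl
              · have hr1 : pvSep <:+: r := by
                  apply ih _ _ hm'
                  have h5 : ('>' :: r).length ≤ v.length := by
                    rw [← hdw]; exact List.length_dropWhile_le _ _
                  simp at h5 hs; omega
                have hsuf2 : r <:+ ('<' :: 'a' :: 'r' :: 'c' :: '_' :: v) := by
                  have hs1 : r <:+ '>' :: r := List.suffix_cons '>' r
                  have hs2 : ('>' :: r) <:+ v := hdw ▸ List.dropWhile_suffix pvNotBr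
                  have hs3 : v <:+ ('<' :: 'a' :: 'r' :: 'c' :: '_' :: v) :=
                    ⟨['<', 'a', 'r', 'c', '_'], rfl⟩
                  exact (hs1.trans hs2).trans hs3
                exact hr1.trans hsuf2.isInfix
            · rw [pvTok_arc_fail v (by
                intro rr hrr
                rw [hdw] at hrr
                have : d = '>' := by injection hrr
                exact absurd this hdq)] at hm
              exact (ih _ hlen' hm).trans hsuf.isInfix
        · rw [pvTok_cons_noarc s' (fun hs' => h2 ((PySem.Chars.startswith_iff _ _).mp hs'))] at hm
          exact (ih _ hlen' hm).trans hsuf.isInfix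
      · rw [pvTok_cons_notlt s' h1] at hm
        exact (ih _ hlen' hm).trans hsuf.isInfix

-- (17) the fuel-based splitter equals the clean recursion pvSpl
theorem pvGo : ∀ fuel l cur acc, l.length ≤ fuel →
    PySem.Chars.splitOn.go pvSep fuel l cur acc =
      acc.reverse ++ (match pvSpl l with
        | h :: t => (cur.reverse ++ h) :: t
        | [] => []) := by
  intro fuel
  induction fuel with
  | zero =>
    intro l cur acc hl
    have : l = [] := List.eq_nil_of_length_eq_zero (by omega)
    subst this
    rw [PySem.Chars.splitOn.go]
    simp [pvSpl]
  | succ fuel ih =>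
    intro l cur acc hl
    match l with
    | [] =>
      rw [PySem.Chars.splitOn.go]
      simp [pvSpl]
      omega
    | c :: rest =>
      rw [PySem.Chars.splitOn.go]
      by_cases hp : pvSep.isPrefixOf (c :: rest)
      · rw [if_pos hp]
        have hdrop : List.drop pvSep.length (c :: rest) = rest.drop 7 := rfl
        rw [hdrop, ih _ [] (cur.reverse :: acc) (by
          have : (rest.drop 7).length ≤ rest.length := by simp
          simp at hl ⊢; omega)]
        rw [pvSpl, if_pos hp]
        cases hs : pvSpl (rest.drop 7) with
        | nil => exact absurd hs (pvSpl_ne _)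
        | cons h t => simp
      · rw [if_neg hp]
        rw [ih rest (c :: cur) acc (by simp at hl ⊢; omega)]
        rw [pvSpl, if_neg hp]
        cases hs : pvSpl rest with
        | nil => exact absurd hs (pvSpl_ne _)
        | cons h t => simp

-- (18)
theorem pvSplitOn_eq (l : List Char) : PySem.Chars.splitOn l pvSep = pvSpl l := by
  rw [PySem.Chars.splitOn]
  rw [pvGo (l.length + 1) l [] [] (by omega)]
  cases hs : pvSpl l with
  | nil => exact absurd hs (pvSpl_ne _)
  | cons h t => simp

-- (19) no separator: a single segment
theorem pvS1 : ∀ l, ¬ pvSep <:+: l → pvSpl l = [l] := by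
  intro l
  induction l with
  | nil => intro _; rw [pvSpl]
  | cons c rest ih =>
    intro h
    rw [pvSpl, if_neg (fun hp => h (List.isPrefixOf_iff_prefix.mp hp).isInfix)]
    rw [ih (fun hi => h (hi.trans (List.suffix_cons c rest).isInfix))]

-- (20) split at the first separator occurrence
theorem pvS2 : ∀ s0 rest, (∀ i, i < s0.length → ¬ pvSep <+: (s0 ++ (pvSep ++ rest)).drop i) →
    pvSpl (s0 ++ (pvSep ++ rest)) = s0 :: pvSpl rest := by
  intro s0
  induction s0 with
  | nil =>
    intro rest _
    rw [List.nil_append]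
    have hsh : (pvSep ++ rest : List Char) = '<' :: (['a', 'r', 'c', '_', 'n', 'l', '>'] ++ rest) := rfl
    rw [hsh, pvSpl, if_pos (by
      rw [← hsh]
      exact List.isPrefixOf_iff_prefix.mpr (List.prefix_append pvSep rest))]
    have : (['a', 'r', 'c', '_', 'n', 'l', '>'] ++ rest : List Char).drop 7 = rest := by
      rw [List.drop_append_of_le_length (by simp)]
      rfl
    rw [this]
  | cons c s0' ih =>
    intro rest h
    rw [List.cons_append, pvSpl, if_neg (by
      intro hp
      have h0 := h 0 (by simp)
      rw [List.drop_zero] at h0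
      exact h0 (by
        rw [List.cons_append]
        exact List.isPrefixOf_iff_prefix.mp hp))]
    rw [ih rest (by
      intro i hi
      have := h (i + 1) (by simp; omega)
      rw [List.cons_append, List.drop_succ_cons] at this
      exact this)]

-- (24) the heart: A's split-and-scan equals B's tokenize-and-group
theorem pvMain : ∀ n cs, cs.length ≤ n → pvRunA (pvSpl cs) = pvGroups (pvTokens cs) [] := by
  intro n
  induction n with
  | zero =>
    intro cs hl
    have : cs = [] := List.eq_nil_of_length_eq_zero (by omega)
    subst this
    rw [pvSpl, pvTok_nil, pvRunA, pvRunA, pvGroups]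
    simp [pvRow]
  | succ n ih =>
    intro cs hl
    by_cases hinf : pvSep <:+: cs
    · -- split at the FIRST occurrence of '<arc_nl>'
      have h0 : 0 ≤ PySem.Chars.find cs pvSep := (PySem.Chars.find_nonneg_iff _ _).mpr hinf
      obtain ⟨hpre, hmin⟩ := PySem.Chars.find_spec h0
      set k := (PySem.Chars.find cs pvSep).toNat with hk
      have hkle : k ≤ cs.length := by
        have := PySem.Chars.find_le_length cs pvSep
        omega
      obtain ⟨rest, hrest⟩ := hpre
      have hcs : cs = cs.take k ++ (pvSep ++ rest) := by
        rw [hrest, List.take_append_drop]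
      have hs0len : (cs.take k).length = k := by simp [hkle]
      have hH : ∀ i, i < (cs.take k).length →
          ¬ pvSep <+: (cs.take k ++ (pvSep ++ rest)).drop i := by
        intro i hi
        rw [← hcs]
        exact hmin i (by rw [hs0len] at hi; exact hi)
      have hrestlen : rest.length ≤ n := by
        have h1 : cs.length = (cs.take k).length + (pvSep.length + rest.length) := by
          conv_lhs => rw [hcs]
          simp
        simp [pvSep] at h1
        omega
      have hnl : "nl".toList ∉ pvTokens (cs.take k) := by
        intro hm
        obtain ⟨u, w, huw⟩ := pvTok_infix (cs.take k).length (cs.take k) le_rfl hm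
        have hu_lt : u.length < (cs.take k).length := by
          rw [← huw]; simp [pvSep]
        apply hH u.length hu_lt
        rw [← huw, List.append_assoc, List.append_assoc, List.drop_left]
        exact (List.prefix_append pvSep w).trans
          (List.prefix_append (pvSep ++ w) (pvSep ++ rest))
      conv_lhs => rw [hcs, pvS2 (cs.take k) rest hH, pvRunA]
      conv_rhs => rw [hcs, pvB1 (cs.take k).length (cs.take k) le_rfl rest]
      rw [pvG3 (pvTokens (cs.take k)) (pvTokens rest) [] hnl]
      rw [pvB2 (cs.take k).length (cs.take k) le_rfl]
      rw [ih rest hrestlen]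
      simp
    · rw [pvS1 cs hinf, pvRunA, pvRunA]
      have hnl : "nl".toList ∉ pvTokens cs :=
        fun hm => hinf (pvTok_infix cs.length cs le_rfl hm)
      rw [pvG2 (pvTokens cs) [] hnl, pvB2 cs.length cs le_rfl]
      simp

-- ===== VERDICT (by name: the statement is the Claim_ definition above) =====
theorem extract_grid_from_text_spec : Claim_equal_extract_grid_from_text := by
  intro text _
  show extract_grid_from_text text = extract_grid_from_text_alt text
  rw [extract_grid_from_text, extract_grid_from_text_alt]
  by_cases he : text.toList.isEmpty
  · rw [if_pos he, if_pos he]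
  · rw [if_neg he, if_neg he]
    dsimp only
    rw [pvSepStr_eq, pvSplitOn_eq, pvFoldRunA, pvFoldB]
    rw [pvMain _ _ le_rfl]
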